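-- pv_equiv track=rewrite | github.com/JustChaos10/Rasa-Alizha-Chatbot | plugins/adaptive_card_tool.py | _get_image_by_purpose
-- ===== SOURCE A (Python) =====
-- from typing import Any, Dict, List, Optional, Tuple
--
-- def _get_image_by_purpose(
--
--     images: List[Dict[str, str]],
-- ) -> Tuple[List[Dict[str, str]], List[Dict[str, str]], List[Dict[str, str]]]:
--     """Categorize images by purpose."""
--     heroes = [img for img in images if img.get("purpose") == "hero"]
--     content = [img for img in images if img.get("purpose") == "content"]
--     icons = [img for img in images if img.get("purpose") == "icon"]
--     if not heroes and not content and not icons and images: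
--         heroes = images[:2]
--         content = images[2:6]
--         icons = images[6:]
--     return heroes, content, icons
-- ===== SOURCE B (Python) =====
-- def _get_image_by_purpose(images):
--     heroes, content, icons = [], [], []
--     for img in images:
--         p = img.get("purpose")
--         if p == "hero":
--             heroes.append(img)
--         elif p == "content":
--             content.append(img)
--         elif p == "icon":
--             icons.append(img)
--     if not (heroes or content or icons) and images:
--         return images[:2], images[2:6], images[6:]
--     return heroes, content, icons
-- ===== Notes on version B (the rewrite author's own statement) =====
-- stated objective: alternative
-- what changed: Replaces A's three separate filter passes over images with a single loop that dispatches each image into one of three accumulator lists via an if/elif chain; the fallback split is unchanged.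
import Mathlib
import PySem

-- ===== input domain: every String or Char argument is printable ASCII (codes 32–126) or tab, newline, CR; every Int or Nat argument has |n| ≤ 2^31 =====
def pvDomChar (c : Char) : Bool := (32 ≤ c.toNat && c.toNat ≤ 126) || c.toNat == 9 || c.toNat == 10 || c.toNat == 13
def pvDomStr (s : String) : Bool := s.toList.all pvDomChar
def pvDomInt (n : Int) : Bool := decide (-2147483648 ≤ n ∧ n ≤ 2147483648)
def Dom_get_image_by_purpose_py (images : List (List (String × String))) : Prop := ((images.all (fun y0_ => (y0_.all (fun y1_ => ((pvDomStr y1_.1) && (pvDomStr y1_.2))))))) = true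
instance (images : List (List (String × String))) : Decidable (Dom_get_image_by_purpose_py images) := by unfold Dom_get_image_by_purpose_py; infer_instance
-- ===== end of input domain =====

-- B makes a single dispatching pass with three accumulator lists instead of A's three filter passes; same return value.
-- ===== PORT A =====
-- A: three list comprehensions filtering by purpose, then a fallback slicing.
def get_image_by_purpose_py (images : List (List (String × String))) : (List (List (String × String))) × (List (List (String × String))) × (List (List (String × String))) :=
  let heroes := images.filter (fun img => (PySem.Dict.mk img).get? "purpose" == some "hero")
  let content := images.filter (fun img => (PySem.Dict.mk img).get? "purpose" == some "content")
  let icons := images.filter (fun img => (PySem.Dict.mk img).get? "purpose" == some "icon")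
  if heroes.isEmpty && content.isEmpty && icons.isEmpty && !images.isEmpty then
    (PySem.List.slice images none (some 2), PySem.List.slice images (some 2) (some 6), PySem.List.slice images (some 6) none)
  else
    (heroes, content, icons)

-- ===== PORT B =====
-- B: one loop over images appending each to heroes/content/icons by an if/elif chain on its purpose.
def pvDispatchStep (acc : (List (List (String × String))) × (List (List (String × String))) × (List (List (String × String)))) (img : List (String × String)) : (List (List (String × String))) × (List (List (String × String))) × (List (List (String × String))) :=
  let p := (PySem.Dict.mk img).get? "purpose"
  if p == some "hero" then (acc.1 ++ [img], acc.2.1, acc.2.2)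
  else if p == some "content" then (acc.1, acc.2.1 ++ [img], acc.2.2)
  else if p == some "icon" then (acc.1, acc.2.1, acc.2.2 ++ [img])
  else acc

def get_image_by_purpose_py_alt (images : List (List (String × String))) : (List (List (String × String))) × (List (List (String × String))) × (List (List (String × String))) :=
  let acc := images.foldl pvDispatchStep ([], [], [])
  if !(!acc.1.isEmpty || !acc.2.1.isEmpty || !acc.2.2.isEmpty) && !images.isEmpty then
    (PySem.List.slice images none (some 2), PySem.List.slice images (some 2) (some 6), PySem.List.slice images (some 6) none)
  else
    acc

-- ===== PRECONDITION & SPEC =====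
def Spec_get_image_by_purpose_py (images : List (List (String × String))) (out : (List (List (String × String))) × (List (List (String × String))) × (List (List (String × String)))) : Prop := out = get_image_by_purpose_py_alt images
instance (images : List (List (String × String))) (out : (List (List (String × String))) × (List (List (String × String))) × (List (List (String × String)))) : Decidable (Spec_get_image_by_purpose_py images out) := by unfold Spec_get_image_by_purpose_py; infer_instance

-- ===== CLAIM (what is proved, stated in full; the proofs are below) =====
def Claim_equal_get_image_by_purpose_py : Prop := ∀ (images : List (List (String × String))), Dom_get_image_by_purpose_py images → Spec_get_image_by_purpose_py images (get_image_by_purpose_py images)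

-- ===== LEMMAS AND PROOFS =====
-- The single dispatch pass accumulates exactly the three filters.
theorem foldl_dispatch (l : List (List (String × String))) (acc : (List (List (String × String))) × (List (List (String × String))) × (List (List (String × String)))) :
    l.foldl pvDispatchStep acc
      = (acc.1 ++ l.filter (fun img => (PySem.Dict.mk img).get? "purpose" == some "hero"),
         acc.2.1 ++ l.filter (fun img => (PySem.Dict.mk img).get? "purpose" == some "content"),
         acc.2.2 ++ l.filter (fun img => (PySem.Dict.mk img).get? "purpose" == some "icon")) := by
  induction l generalizing acc with
  | nil => simp
  | cons x xs ih =>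
    simp only [List.foldl_cons, List.filter_cons, ih]
    unfold pvDispatchStep
    by_cases h1 : (PySem.Dict.mk x).get? "purpose" == some "hero"
    · have he : (PySem.Dict.mk x).get? "purpose" = some "hero" := by simpa using h1
      simp [h1, he]
    · by_cases h2 : (PySem.Dict.mk x).get? "purpose" == some "content"
      · simp_all
      · by_cases h3 : (PySem.Dict.mk x).get? "purpose" == some "icon"
        · simp_all
        · simp_all

-- ===== VERDICT (by name: the statement is the Claim_ definition above) =====
theorem get_image_by_purpose_py_spec : Claim_equal_get_image_by_purpose_py := by
  intro images _
  unfold Spec_get_image_by_purpose_py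
  simp only [get_image_by_purpose_py, get_image_by_purpose_py_alt, foldl_dispatch, List.nil_append]
  by_cases h : (images.filter (fun img => (PySem.Dict.mk img).get? "purpose" == some "hero")).isEmpty
      && (images.filter (fun img => (PySem.Dict.mk img).get? "purpose" == some "content")).isEmpty
      && (images.filter (fun img => (PySem.Dict.mk img).get? "purpose" == some "icon")).isEmpty
      && !images.isEmpty
  · simp_all
  · simp_all
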